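-- pv_equiv track=rewrite | github.com/renejara-engineer/tfm-ucm-data-platform-final | TFM_Anexos/cap6_gobierno_datos/hallazgos_data_quality/Analisis_Preliminar/archivos/2026-01-20_AnalisisLIC_opcion2.py | elegir_columna_oc
-- ===== SOURCE A (Python) =====
-- def elegir_columna_oc(cols_oc):
--     """
--     Devuelve la mejor columna candidata para relacionar con LIC.
--     Prioridad:
--       1) contiene 'codigolicit' (variantes)
--       2) contiene 'codigoextern' (por si viene así en OC)
--       3) columna exactamente 'Codigo'
--     """
--     lower_map = {c.lower(): c for c in cols_oc}
--
--     # 1) Buscar variantes de CodigoLicitacion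
--     for key in lower_map.keys():
--         if "codigolicit" in key:   # captura codigolicitacion, codigo_licitacion, etc.
--             return lower_map[key]
--
--     # 2) Buscar CodigoExterno si existiera en OC
--     for key in lower_map.keys():
--         if "codigoextern" in key:
--             return lower_map[key]
--
--     # 3) Fallback a Codigo
--     if "codigo" in lower_map:
--         return lower_map["codigo"]
--
--     return None
-- ===== SOURCE B (Python) =====
-- def elegir_columna_oc(cols_oc):
--     """Single-pass rank-based selection over the lowercase->original map."""
--     seen = {}
--     for c in cols_oc:
--         seen[c.lower()] = c
--     best_rank = 3
--     best = None
--     for k, v in seen.items():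
--         if "codigolicit" in k:
--             r = 0
--         elif "codigoextern" in k:
--             r = 1
--         elif k == "codigo":
--             r = 2
--         else:
--             continue
--         if r < best_rank:
--             best_rank = r
--             best = v
--     return best
-- ===== Notes on version B (the rewrite author's own statement) =====
-- stated objective: alternative
-- what changed: A's three sequential scans over the lowercase-key map (one per priority tier) are replaced by a single pass over the items that ranks each key (0/1/2) and keeps the earliest key of the best rank.
import Mathlib
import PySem

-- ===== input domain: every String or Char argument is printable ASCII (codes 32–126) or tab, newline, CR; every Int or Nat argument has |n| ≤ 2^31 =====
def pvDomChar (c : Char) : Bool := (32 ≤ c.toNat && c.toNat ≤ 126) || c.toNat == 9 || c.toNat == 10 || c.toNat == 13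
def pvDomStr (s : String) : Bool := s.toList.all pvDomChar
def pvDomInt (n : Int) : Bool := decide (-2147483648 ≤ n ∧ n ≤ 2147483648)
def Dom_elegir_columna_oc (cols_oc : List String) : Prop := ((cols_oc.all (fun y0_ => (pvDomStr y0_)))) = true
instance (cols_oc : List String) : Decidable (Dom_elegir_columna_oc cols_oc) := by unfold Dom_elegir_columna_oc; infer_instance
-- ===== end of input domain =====

-- B replaces A's three sequential scans of the lowercase-key map by one single
-- pass that ranks each key (0/1/2) and keeps the first key of the best rank
-- (objective: alternative decomposition, same cost).


-- ===== PORT A =====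
-- 'for key in lower_map.keys(): if sub in key: return lower_map[key]'
-- lower_map[key] is ported as getD with dummy default "" (key comes from keys(), so it is present).
def pvALoop (d : PySem.Dict String String) (sub : String) : List String → Option String
  | [] => none
  | k :: ks =>
    if PySem.Str.isIn sub k then some (d.getD k "") else pvALoop d sub ks

-- the function body after building lower_map (the three prioritized scans)
def pvABody (lower_map : PySem.Dict String String) : Option String :=
  match pvALoop lower_map "codigolicit" lower_map.keys with
  | some v => some v
  | none =>
    match pvALoop lower_map "codigoextern" lower_map.keys with
    | some v => some v
    | none =>
      if lower_map.contains "codigo" then some (lower_map.getD "codigo" "") else none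

def elegir_columna_oc (cols_oc : List String) : Option String :=
  pvABody (cols_oc.foldl (fun d c => d.insert (PySem.Str.lower c) c) PySem.Dict.empty)

-- ===== PORT B =====
-- one fold over seen.items(); state = (best_rank, best); 'continue' = keep state
def pvBStep (st : Nat × Option String) (p : String × String) : Nat × Option String :=
  if PySem.Str.isIn "codigolicit" p.1 then (if 0 < st.1 then (0, some p.2) else st)
  else if PySem.Str.isIn "codigoextern" p.1 then (if 1 < st.1 then (1, some p.2) else st)
  else if p.1 == "codigo" then (if 2 < st.1 then (2, some p.2) else st)
  else st

def pvBBody (seen : PySem.Dict String String) : Option String :=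
  (seen.items.foldl pvBStep (3, none)).2

def elegir_columna_oc_alt (cols_oc : List String) : Option String :=
  pvBBody (cols_oc.foldl (fun d c => d.insert (PySem.Str.lower c) c) PySem.Dict.empty)

-- ===== PRECONDITION & SPEC =====
def Spec_elegir_columna_oc (cols_oc : List String) (out : Option String) : Prop := out = elegir_columna_oc_alt cols_oc
instance (cols_oc : List String) (out : Option String) : Decidable (Spec_elegir_columna_oc cols_oc out) := by unfold Spec_elegir_columna_oc; infer_instance

-- ===== CLAIM (what is proved, stated in full; the proofs are below) =====
def Claim_equal_elegir_columna_oc : Prop := ∀ (cols_oc : List String), Dom_elegir_columna_oc cols_oc → Spec_elegir_columna_oc cols_oc (elegir_columna_oc cols_oc)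

-- ===== LEMMAS AND PROOFS =====

-- the three tiers as named predicates on items pairs
def pvP0 (p : String × String) : Bool := PySem.Str.isIn "codigolicit" p.1
def pvP1 (p : String × String) : Bool := PySem.Str.isIn "codigoextern" p.1
def pvP2 (p : String × String) : Bool := p.1 == "codigo"

lemma pvBStep_eq (st : Nat × Option String) (p : String × String) :
    pvBStep st p =
      if pvP0 p then (if 0 < st.1 then (0, some p.2) else st)
      else if pvP1 p then (if 1 < st.1 then (1, some p.2) else st)
      else if pvP2 p then (if 2 < st.1 then (2, some p.2) else st)
      else st := rfl

-- rank 0 is final: the fold never changes a state with best_rank = 0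
lemma pvB_rank0 (l : List (String × String)) (b : Option String) :
    l.foldl pvBStep (0, b) = (0, b) := by
  induction l with
  | nil => rfl
  | cons p l ih => simp only [List.foldl_cons, pvBStep_eq]; split_ifs <;> simp_all

lemma pvB_rank1 (l : List (String × String)) (b : Option String) :
    (l.foldl pvBStep (1, b)).2 =
      (match l.find? pvP0 with | some p => some p.2 | none => b) := by
  induction l generalizing b with
  | nil => rfl
  | cons p l ih =>
    simp only [List.foldl_cons, pvBStep_eq, List.find?_cons]
    by_cases h0 : pvP0 p = true
    · simp [h0, pvB_rank0]
    · simp [h0, ih]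

lemma pvB_rank2 (l : List (String × String)) (b : Option String) :
    (l.foldl pvBStep (2, b)).2 =
      (match l.find? pvP0 with
       | some p => some p.2
       | none =>
         match l.find? pvP1 with | some p => some p.2 | none => b) := by
  induction l generalizing b with
  | nil => rfl
  | cons p l ih =>
    simp only [List.foldl_cons, pvBStep_eq, List.find?_cons]
    by_cases h0 : pvP0 p = true
    · simp [h0, pvB_rank0]
    · by_cases h1 : pvP1 p = true
      · simp [h0, h1, pvB_rank1]
      · by_cases h2 : pvP2 p = true
        · simp [h0, h1, h2, ih]
        · simp [h0, h1, h2, ih]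

lemma pvB_rank3 (l : List (String × String)) :
    (l.foldl pvBStep ((3 : Nat), (none : Option String))).2 =
      (match l.find? pvP0 with
       | some p => some p.2
       | none =>
         match l.find? pvP1 with
         | some p => some p.2
         | none =>
           match l.find? pvP2 with | some p => some p.2 | none => none) := by
  induction l with
  | nil => rfl
  | cons p l ih =>
    simp only [List.foldl_cons, pvBStep_eq, List.find?_cons]
    by_cases h0 : pvP0 p = true
    · simp [h0, pvB_rank0]
    · by_cases h1 : pvP1 p = true
      · simp [h0, h1, pvB_rank1]
      · by_cases h2 : pvP2 p = true
        · simp [h0, h1, h2, pvB_rank2]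
        · simp [h0, h1, h2, ih]

-- A's key-scan-with-lookup over d.keys is the find? over d.items (keys nodup)
lemma pvALoop_eq_find (d : PySem.Dict String String) (sub : String)
    (hnd : d.keys.Nodup) :
    pvALoop d sub d.keys = (d.items.find? (fun p => PySem.Str.isIn sub p.1)).map (·.2) := by
  have key : ∀ l : List (String × String), (∀ p ∈ l, p ∈ d.items) →
      pvALoop d sub (l.map Prod.fst) = (l.find? (fun p => PySem.Str.isIn sub p.1)).map (·.2) := by
    intro l
    induction l with
    | nil => intro _; rfl
    | cons p l ih =>
      intro hmem
      obtain ⟨k, v⟩ := p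
      by_cases h : PySem.Str.isIn sub k = true
      · have hv : d.getD k "" = v :=
          PySem.Dict.getD_of_mem_items d (hmem (k, v) (by simp)) hnd ""
        rw [PySem.Str.isIn_eq] at h
        simp only [List.map_cons, pvALoop, List.find?_cons]
        simp [h, hv]
      · simp only [List.map_cons, pvALoop, List.find?_cons]
        simp only [h, Bool.false_eq_true, if_false]
        exact ih (fun q hq => hmem q (List.mem_cons_of_mem _ hq))
  have hk : d.keys = d.items.map Prod.fst := rfl
  rw [hk, key d.items (fun p hp => hp)]

lemma pvALoop0 (d : PySem.Dict String String) (hnd : d.keys.Nodup) :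
    pvALoop d "codigolicit" d.keys = (d.items.find? pvP0).map (·.2) :=
  pvALoop_eq_find d _ hnd

lemma pvALoop1 (d : PySem.Dict String String) (hnd : d.keys.Nodup) :
    pvALoop d "codigoextern" d.keys = (d.items.find? pvP1).map (·.2) :=
  pvALoop_eq_find d _ hnd

-- dict lookup 'codigo' as first-match find? over items
lemma pvGet?_eq_find (d : PySem.Dict String String) :
    d.get? "codigo" = (d.items.find? pvP2).map (·.2) := by
  obtain ⟨l⟩ := d
  induction l with
  | nil => rfl
  | cons p l ih =>
    obtain ⟨k, v⟩ := p
    rw [PySem.Dict.get?_mk_cons]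
    by_cases h : (k == "codigo") = true
    · have : pvP2 (k, v) = true := h
      simp only [PySem.Dict.items] at *
      simp [h, List.find?_cons, this]
    · have : pvP2 (k, v) = false := Bool.eq_false_iff.mpr h
      simp only [PySem.Dict.items] at *
      simp [h, List.find?_cons, this, ih]

lemma pvHc (d : PySem.Dict String String) :
    (if d.contains "codigo" then some (d.getD "codigo" "") else none)
      = (d.items.find? pvP2).map (·.2) := by
  rw [PySem.Dict.contains_eq_isSome_get?, PySem.Dict.getD_eq_get?_getD, pvGet?_eq_find d]
  cases h : d.items.find? pvP2 <;> simp [h]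

lemma pv_keys_nodup (cols_oc : List String) :
    (cols_oc.foldl (fun d c => d.insert (PySem.Str.lower c) c)
      (PySem.Dict.empty : PySem.Dict String String)).keys.Nodup :=
  PySem.Dict.nodup_keys_foldl_insert_key cols_oc _ _ _ PySem.Dict.nodup_keys_empty

lemma pvBody_eq (d : PySem.Dict String String) (hnd : d.keys.Nodup) :
    pvABody d = pvBBody d := by
  unfold pvABody pvBBody
  rw [pvB_rank3, pvALoop0 d hnd, pvALoop1 d hnd, pvHc d]
  cases h0 : d.items.find? pvP0 <;> cases h1 : d.items.find? pvP1 <;>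
    cases h2 : d.items.find? pvP2 <;> simp

-- ===== VERDICT (by name: the statement is the Claim_ definition above) =====
theorem elegir_columna_oc_spec : Claim_equal_elegir_columna_oc := by
  intro cols_oc _
  unfold Spec_elegir_columna_oc elegir_columna_oc elegir_columna_oc_alt
  exact pvBody_eq _ (pv_keys_nodup cols_oc)
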